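-- pv_equiv track=rewrite | github.com/thejimmylin/gong-xi-fa-cai | gong_xi_fa_cai.py | get_good_prices
-- ===== SOURCE A (Python) =====
-- def get_good_prices(max_price, false_odd_prefixes=["1"], max_prefix_len=2):
--     good_prices = []
--     for price in range(1, max_price + 1):
--         if is_good_price(
--             price,
--             false_odd_prefixes=false_odd_prefixes,
--             max_prefix_len=max_prefix_len,
--         ):
--             good_prices.append(price)
--     return good_prices
--
-- def is_good_price(price, false_odd_prefixes=["1"], max_prefix_len=2):
--     if need_to_use_change(price):
--         return False
--     if contains_4(price):
--         return False
--     if contains_8(price):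
--         return False
--     if prefix_is_odd(price, false_odd_prefixes=false_odd_prefixes):
--         return False
--     if prefix_is_too_long(price, max_prefix_len=max_prefix_len):
--         return False
--     if prefix_better_starts_with_6(price):
--         return False
--     if prefix_better_starts_with_1(price):
--         return False
--     return True
--
-- def need_to_use_change(price):
--     min_bill = 100
--     if price % min_bill == 0:
--         return False
--     else:
--         return True
--
-- def contains_4(price):
--     if "4" in str(price):
--         return True
--     else:
--         return False
--
-- def contains_8(price):
--     if "8" in str(price):
--         return True
--     else:
--         return False
--
-- def prefix_is_odd(price, false_odd_prefixes=["1"]):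
--     prefix = get_prefix(price)
--     if int(prefix) % 2 == 0:
--         return False
--     if prefix in false_odd_prefixes:
--         return False
--     return True
--
-- def prefix_is_too_long(price, max_prefix_len=2):
--     prefix = get_prefix(price)
--     if len(prefix) > max_prefix_len:
--         return True
--     else:
--         return False
--
-- def prefix_better_starts_with_6(price):
--     prefix = get_prefix(price)
--     if prefix.startswith("5"):
--         return True
--     if prefix.startswith("7"):
--         return True
--     return False
--
-- def prefix_better_starts_with_1(price):
--     prefix = get_prefix(price)
--     if prefix.startswith("9"):
--         return True
--     else:
--         return False
--
-- def get_prefix(price):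
--     prefix = str(price).rstrip("0")
--     return prefix
-- ===== SOURCE B (Python) =====
-- def get_good_prices(max_price, false_odd_prefixes=["1"], max_prefix_len=2):
--     # Scan only the multiples of 100 (the only prices that need no change),
--     # with one fused predicate that builds str(price) and its prefix once.
--     result = []
--     fops = set(false_odd_prefixes)
--     for price in range(100, max_price + 1, 100):
--         s = str(price)
--         if "4" in s or "8" in s:
--             continue
--         prefix = s.rstrip("0")
--         if len(prefix) > max_prefix_len:
--             continue
--         if prefix[0] in "579":
--             continue
--         if int(prefix) % 2 == 1 and prefix not in fops:
--             continue
--         result.append(price)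
--     return result
-- ===== Notes on version B (the rewrite author's own statement) =====
-- stated objective: faster
-- what changed: B iterates only over the multiples of 100 (range(100, max_price+1, 100)) with one fused predicate that builds str(price) and its stripped prefix once and checks prefix membership in a set built once, instead of A's scan of every price 1..max_price through seven helper functions with an O(n) list membership scan.
import Mathlib
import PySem

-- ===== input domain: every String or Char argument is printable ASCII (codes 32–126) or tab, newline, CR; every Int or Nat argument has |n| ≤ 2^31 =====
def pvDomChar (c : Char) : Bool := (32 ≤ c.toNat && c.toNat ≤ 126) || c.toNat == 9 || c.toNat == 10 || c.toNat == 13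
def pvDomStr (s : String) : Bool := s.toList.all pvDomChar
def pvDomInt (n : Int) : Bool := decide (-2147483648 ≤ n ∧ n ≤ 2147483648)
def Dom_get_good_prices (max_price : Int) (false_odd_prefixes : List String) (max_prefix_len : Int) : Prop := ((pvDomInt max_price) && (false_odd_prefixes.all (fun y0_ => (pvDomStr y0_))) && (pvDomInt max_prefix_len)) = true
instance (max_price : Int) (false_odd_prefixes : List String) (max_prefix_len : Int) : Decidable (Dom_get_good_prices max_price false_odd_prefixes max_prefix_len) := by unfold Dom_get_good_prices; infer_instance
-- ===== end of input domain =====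

-- B scans only the multiples of 100 with one fused predicate instead of testing every
-- price 1..max_price through seven helpers (measured constant-factor speed-up).

-- ===== PORT A =====
-- Python str values are ported as List Char; str(price).rstrip("0") is ported by hand
-- (drop the trailing '0' characters) — exact: rstrip("0") removes exactly those.
def pyA_get_prefix (price : Int) : List Char :=
  ((PySem.Int.toChars price).reverse.dropWhile (· == '0')).reverse

def pyA_need_to_use_change (price : Int) : Bool :=
  if PySem.Int.mod price 100 == 0 then false else true

def pyA_contains_4 (price : Int) : Bool :=
  if PySem.Chars.isIn ['4'] (PySem.Int.toChars price) then true else false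

def pyA_contains_8 (price : Int) : Bool :=
  if PySem.Chars.isIn ['8'] (PySem.Int.toChars price) then true else false

-- int(pfx): the pfx is nonempty digits for every price ≥ 1 that A's loop reaches,
-- so int() never raises there; `(ofChars? …).getD 0` is exact on those inputs.
def pyA_prefix_is_odd (price : Int) (false_odd_prefixes : List String) : Bool :=
  let pfx := pyA_get_prefix price
  if PySem.Int.mod ((PySem.Int.ofChars? pfx).getD 0) 2 == 0 then false
  else if false_odd_prefixes.any (fun t => t.toList == pfx) then false
  else true

def pyA_prefix_is_too_long (price : Int) (max_prefix_len : Int) : Bool :=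
  let pfx := pyA_get_prefix price
  if (pfx.length : Int) > max_prefix_len then true else false

def pyA_prefix_better_starts_with_6 (price : Int) : Bool :=
  let pfx := pyA_get_prefix price
  if PySem.Chars.startswith pfx ['5'] then true
  else if PySem.Chars.startswith pfx ['7'] then true
  else false

def pyA_prefix_better_starts_with_1 (price : Int) : Bool :=
  let pfx := pyA_get_prefix price
  if PySem.Chars.startswith pfx ['9'] then true else false

def pyA_is_good_price (price : Int) (false_odd_prefixes : List String) (max_prefix_len : Int) : Bool :=
  if pyA_need_to_use_change price then false
  else if pyA_contains_4 price then false
  else if pyA_contains_8 price then false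
  else if pyA_prefix_is_odd price false_odd_prefixes then false
  else if pyA_prefix_is_too_long price max_prefix_len then false
  else if pyA_prefix_better_starts_with_6 price then false
  else if pyA_prefix_better_starts_with_1 price then false
  else true

def get_good_prices (max_price : Int) (false_odd_prefixes : List String) (max_prefix_len : Int) : List Int :=
  (PySem.List.pyRange 1 (max_price + 1) 1).foldl
    (fun acc price =>
      if pyA_is_good_price price false_odd_prefixes max_prefix_len then acc ++ [price] else acc) []

-- ===== PORT B =====
-- pfx[0]: never raises in B's loop (price ≥ 100 there), ported as pyGet? … |>.getD ' ';
-- s.rstrip("0") ported by hand as on the A side; Python's set(false_odd_prefixes) is a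
-- PySem.Set of the strings (as List Char).
def pyB_keep (price : Int) (fops_set : PySem.Set (List Char)) (max_prefix_len : Int) : Bool :=
  let s := PySem.Int.toChars price
  if PySem.Chars.isIn ['4'] s || PySem.Chars.isIn ['8'] s then false
  else
    let pfx := (s.reverse.dropWhile (· == '0')).reverse
    if (pfx.length : Int) > max_prefix_len then false
    else if PySem.Chars.isIn [(PySem.List.pyGet? pfx 0).getD ' '] ['5', '7', '9'] then false
    else if PySem.Int.mod ((PySem.Int.ofChars? pfx).getD 0) 2 == 1
            && !(PySem.Set.contains fops_set pfx) then false
    else true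

def get_good_prices_alt (max_price : Int) (false_odd_prefixes : List String) (max_prefix_len : Int) : List Int :=
  let fops_set := PySem.Set.ofList (false_odd_prefixes.map (fun t => t.toList))
  (PySem.List.pyRange 100 (max_price + 1) 100).foldl
    (fun acc price =>
      if pyB_keep price fops_set max_prefix_len then acc ++ [price] else acc) []

-- ===== PRECONDITION & SPEC =====
def Spec_get_good_prices (max_price : Int) (false_odd_prefixes : List String) (max_prefix_len : Int) (out : List Int) : Prop := out = get_good_prices_alt max_price false_odd_prefixes max_prefix_len
instance (max_price : Int) (false_odd_prefixes : List String) (max_prefix_len : Int) (out : List Int) : Decidable (Spec_get_good_prices max_price false_odd_prefixes max_prefix_len out) := by unfold Spec_get_good_prices; infer_instance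

-- ===== CLAIM (what is proved, stated in full; the proofs are below) =====
def Claim_equal_get_good_prices : Prop := ∀ (max_price : Int) (false_odd_prefixes : List String) (max_prefix_len : Int), Dom_get_good_prices max_price false_odd_prefixes max_prefix_len → Spec_get_good_prices max_price false_odd_prefixes max_prefix_len (get_good_prices max_price false_odd_prefixes max_prefix_len)

-- ===== LEMMAS AND PROOFS =====

-- B's first-character test agrees with A's three startswith tests (both are false on the
-- empty pfx: pyGet? gives ' ', which is not in "579").
theorem head_in_579_eq (pfx : List Char) :
    PySem.Chars.isIn [(PySem.List.pyGet? pfx 0).getD ' '] ['5', '7', '9']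
      = (PySem.Chars.startswith pfx ['5'] || PySem.Chars.startswith pfx ['7']
          || PySem.Chars.startswith pfx ['9']) := by
  cases pfx with
  | nil => decide
  | cons c rest =>
      have hget : PySem.List.pyGet? (c :: rest) (0 : Int) = some c := by
        simp [PySem.List.pyGet?, PySem.List.pyIdx?]
      rw [hget, Bool.eq_iff_iff]
      simp only [Option.getD_some, Bool.or_eq_true, PySem.Chars.isIn_iff_infix,
        List.singleton_infix_iff, PySem.Chars.startswith_iff, List.cons_prefix_cons,
        List.nil_prefix, and_true, List.mem_cons, List.not_mem_nil, or_false]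
      constructor
      · rintro (h | h | h) <;> subst h <;> simp
      · rintro ((h | h) | h) <;> subst h <;> simp

-- A's seven-test predicate equals "multiple of 100 AND B's fused predicate".
-- abstract boolean core of the predicate equality (atoms of both predicates as variables)
theorem pred_core (m100 c4 c8 e0 e1 mem sw5 sw7 sw9 : Bool) (tl : Prop) [Decidable tl]
    (h : e1 = !e0) :
    (if (if m100 then false else true) then false
     else if (if c4 then true else false) then false
     else if (if c8 then true else false) then false
     else if (if e0 then false else if mem then false else true) then false
     else if (if tl then true else false) then false
     else if (if sw5 then true else if sw7 then true else false) then false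
     else if (if sw9 then true else false) then false
     else true)
    = (m100 &&
        (if c4 || c8 then false
         else if tl then false
         else if sw5 || sw7 || sw9 then false
         else if e1 && !mem then false
         else true)) := by
  subst h
  by_cases htl : tl <;>
    simp only [htl, if_true, if_false] <;>
    cases m100 <;> cases c4 <;> cases c8 <;> cases e0 <;> cases mem <;>
    cases sw5 <;> cases sw7 <;> cases sw9 <;> rfl

-- B's set-membership test equals A's list scan over the same strings
theorem set_mem_eq (fops : List String) (pfx : List Char) :
    PySem.Set.contains (PySem.Set.ofList (fops.map (fun t => t.toList))) pfx
      = fops.any (fun t => t.toList == pfx) := by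
  rw [Bool.eq_iff_iff]
  simp only [PySem.Set.contains_eq_listContains, List.contains_iff_mem,
    PySem.Set.mem_ofList, List.mem_map, List.any_eq_true, beq_iff_eq]

-- A's seven-test predicate equals "multiple of 100 AND B's fused predicate".
theorem pred_eq (p : Int) (fops : List String) (mpl : Int) :
    pyA_is_good_price p fops mpl
      = ((PySem.Int.mod p 100 == 0)
          && pyB_keep p (PySem.Set.ofList (fops.map (fun t => t.toList))) mpl) := by
  have h : (PySem.Int.mod ((PySem.Int.ofChars? (((PySem.Int.toChars p).reverse.dropWhile (· == '0')).reverse)).getD 0) 2 == 1)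
      = !(PySem.Int.mod ((PySem.Int.ofChars? (((PySem.Int.toChars p).reverse.dropWhile (· == '0')).reverse)).getD 0) 2 == 0) := by
    rcases PySem.Int.mod_two_eq ((PySem.Int.ofChars? (((PySem.Int.toChars p).reverse.dropWhile (· == '0')).reverse)).getD 0) with h2 | h2 <;>
      rw [h2] <;> rfl
  unfold pyA_is_good_price pyA_need_to_use_change pyA_contains_4 pyA_contains_8
    pyA_prefix_is_odd pyA_prefix_is_too_long pyA_prefix_better_starts_with_6
    pyA_prefix_better_starts_with_1 pyA_get_prefix pyB_keep
  simp only [head_in_579_eq, set_mem_eq]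
  exact pred_core _ _ _ _ _ _ _ _ _ _ h

-- the common filtered-range core: filtering 1..b-1 by divisibility-by-100 ∧ q is
-- filtering the stepped range 100,200,..<b by q
theorem filter_range_step (q : Int → Bool) (b : Int) :
    (PySem.List.pyRange 1 b 1).filter (fun p => (PySem.Int.mod p 100 == 0) && q p)
      = (PySem.List.pyRange 100 b 100).filter q := by
  have h100 : (0 : Int) < 100 := by norm_num
  have pw1 : ((PySem.List.pyRange 1 b 1).filter
      (fun p => (PySem.Int.mod p 100 == 0) && q p)).Pairwise (· < ·) :=
    (PySem.List.pairwise_lt_pyRange_one 1 b).filter _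
  have pw2 : ((PySem.List.pyRange 100 b 100).filter q).Pairwise (· < ·) := by
    refine List.Pairwise.filter _ ?_
    rw [PySem.List.pyRange_of_pos _ _ h100, List.pairwise_map]
    refine (List.pairwise_lt_range).imp ?_
    intro a c h
    omega
  have hperm : ((PySem.List.pyRange 1 b 1).filter
      (fun p => (PySem.Int.mod p 100 == 0) && q p)).Perm
      ((PySem.List.pyRange 100 b 100).filter q) := by
    rw [List.perm_ext_iff_of_nodup (pw1.imp ne_of_lt) (pw2.imp ne_of_lt)]
    intro a
    simp only [List.mem_filter, PySem.List.mem_pyRange_one,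
      PySem.List.mem_pyRange_iff_of_pos h100, Bool.and_eq_true, beq_iff_eq,
      PySem.Int.mod_eq_zero_iff_dvd]
    constructor
    · rintro ⟨⟨h1, h2⟩, hdvd, hq⟩
      exact ⟨⟨by omega, h2, by omega⟩, hq⟩
    · rintro ⟨⟨h1, h2, hdvd⟩, hq⟩
      exact ⟨⟨by omega, h2⟩, ⟨by omega, hq⟩⟩
  exact List.Perm.eq_of_pairwise (fun a c _ _ h1 h2 => absurd h2 (not_lt_of_gt h1))
    pw1 pw2 hperm

-- ===== VERDICT (by name: the statement is the Claim_ definition above) =====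
theorem get_good_prices_spec : Claim_equal_get_good_prices := by
  intro max_price fops mpl _
  unfold Spec_get_good_prices get_good_prices get_good_prices_alt
  rw [PySem.List.foldl_append_if _ (fun x => x), PySem.List.foldl_append_if _ (fun x => x)]
  simp only [List.map_id_fun', id, List.nil_append]
  have : (fun price => pyA_is_good_price price fops mpl)
      = fun p => (PySem.Int.mod p 100 == 0)
          && pyB_keep p (PySem.Set.ofList (fops.map (fun t => t.toList))) mpl := by
    funext p; exact pred_eq p fops mpl
  rw [this, filter_range_step]
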